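-- pv_equiv track=rewrite | github.com/suzuyu/alred | alred/cli.py | render_vni_gateway_markdown_lines
-- ===== SOURCE A (Python) =====
-- from typing import Any, Dict, List, Optional, Set
--
-- def render_vni_gateway_markdown_lines(
--     records: List[Dict[str, str]],
--     title: str,
--     include_vlan_name: bool = False,
-- ) -> List[str]:
--     lines = [f"# {title}", ""]
--     if include_vlan_name:
--         lines.append("| l3vni | vrf | l2vni | gateway_ipv4 | gateway_ipv6 | device | vlan | vlan_name |")
--         lines.append("|---|---|---|---|---|---|---|---|")
--     else:
--         lines.append("| l3vni | vrf | l2vni | gateway_ipv4 | gateway_ipv6 | device | vlan |")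
--         lines.append("|---|---|---|---|---|---|---|")
--     for r in records:
--         if include_vlan_name:
--             lines.append(
--                 "| {l3vni} | {vrf} | {l2vni} | {gateway_ipv4} | {gateway_ipv6} | {device} | {vlan} | {vlan_name} |".format(
--                     l3vni=r.get("l3vni", ""),
--                     vrf=r.get("vrf", ""),
--                     l2vni=r.get("l2vni", ""),
--                     gateway_ipv4=r.get("gateway_ipv4", ""),
--                     gateway_ipv6=r.get("gateway_ipv6", ""),
--                     device=r.get("device", ""),
--                     vlan=r.get("vlan", ""),
--                     vlan_name=r.get("vlan_name", ""),
--                 )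
--             )
--         else:
--             lines.append(
--                 "| {l3vni} | {vrf} | {l2vni} | {gateway_ipv4} | {gateway_ipv6} | {device} | {vlan} |".format(
--                     l3vni=r.get("l3vni", ""),
--                     vrf=r.get("vrf", ""),
--                     l2vni=r.get("l2vni", ""),
--                     gateway_ipv4=r.get("gateway_ipv4", ""),
--                     gateway_ipv6=r.get("gateway_ipv6", ""),
--                     device=r.get("device", ""),
--                     vlan=r.get("vlan", ""),
--                 )
--             )
--     return lines
-- ===== SOURCE B (Python) =====
-- def render_vni_gateway_markdown_lines(records, title, include_vlan_name=False):
--     cols = ["l3vni", "vrf", "l2vni", "gateway_ipv4", "gateway_ipv6", "device", "vlan"]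
--     if include_vlan_name:
--         cols = cols + ["vlan_name"]
--     # stage 1: a cell grid (header row first, then one row of cell strings per record)
--     grid = [cols] + [["{}".format(r.get(c, "")) for c in cols] for r in records]
--     # stage 2: render every grid row with one uniform rule
--     rendered = ["| " + " | ".join(row) + " |" for row in grid]
--     sep = "|" + "|".join(["---"] * len(cols)) + "|"
--     # stage 3: assemble: title block, header line, separator, data lines
--     return ["# " + title, ""] + rendered[:1] + [sep] + rendered[1:]
-- ===== Notes on version B (the rewrite author's own statement) =====
-- stated objective: alternative
-- what changed: B is a staged pipeline: it first builds a cell grid (header row plus one list of looked-up cell strings per record), then renders every grid row with one uniform join rule and assembles the output by slicing the rendered rows around the separator, instead of A's single loop appending hard-coded per-branch format strings.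
import Mathlib
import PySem

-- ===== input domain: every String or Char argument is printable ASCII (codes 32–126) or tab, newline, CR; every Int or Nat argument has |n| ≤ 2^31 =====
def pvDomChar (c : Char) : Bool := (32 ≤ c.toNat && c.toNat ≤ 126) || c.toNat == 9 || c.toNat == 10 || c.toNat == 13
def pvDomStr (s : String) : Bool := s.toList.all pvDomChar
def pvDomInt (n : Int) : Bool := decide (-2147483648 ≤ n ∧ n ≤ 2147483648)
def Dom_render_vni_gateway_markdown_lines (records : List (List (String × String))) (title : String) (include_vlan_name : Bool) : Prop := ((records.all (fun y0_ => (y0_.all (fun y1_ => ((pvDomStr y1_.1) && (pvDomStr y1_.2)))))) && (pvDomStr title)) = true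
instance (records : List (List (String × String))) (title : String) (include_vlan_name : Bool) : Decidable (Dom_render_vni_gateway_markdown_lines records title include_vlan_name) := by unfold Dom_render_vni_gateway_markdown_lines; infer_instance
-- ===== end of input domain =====

-- B is a staged pipeline (cell grid → uniform row rendering → assembly by slicing)
-- instead of A's single loop with duplicated hard-coded format strings; same output, same O(n) cost.

-- Python dict → association list; r.get(k, "") = value of the first pair with key k, else ""
def pvRGet (r : List (String × String)) (k : String) : String :=
  ((r.find? (fun p => p.1 == k)).map Prod.snd).getD ""

-- ===== PORT A =====
def render_vni_gateway_markdown_lines (records : List (List (String × String))) (title : String) (include_vlan_name : Bool) : List String :=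
  let lines := ["# " ++ title, ""]
  let lines :=
    if include_vlan_name then
      lines ++ ["| l3vni | vrf | l2vni | gateway_ipv4 | gateway_ipv6 | device | vlan | vlan_name |",
                "|---|---|---|---|---|---|---|---|"]
    else
      lines ++ ["| l3vni | vrf | l2vni | gateway_ipv4 | gateway_ipv6 | device | vlan |",
                "|---|---|---|---|---|---|---|"]
  records.foldl (fun ls r =>
    if include_vlan_name then
      ls ++ ["| " ++ pvRGet r "l3vni" ++ " | " ++ pvRGet r "vrf" ++ " | " ++ pvRGet r "l2vni" ++ " | "
             ++ pvRGet r "gateway_ipv4" ++ " | " ++ pvRGet r "gateway_ipv6" ++ " | " ++ pvRGet r "device"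
             ++ " | " ++ pvRGet r "vlan" ++ " | " ++ pvRGet r "vlan_name" ++ " |"]
    else
      ls ++ ["| " ++ pvRGet r "l3vni" ++ " | " ++ pvRGet r "vrf" ++ " | " ++ pvRGet r "l2vni" ++ " | "
             ++ pvRGet r "gateway_ipv4" ++ " | " ++ pvRGet r "gateway_ipv6" ++ " | " ++ pvRGet r "device"
             ++ " | " ++ pvRGet r "vlan" ++ " |"]) lines

-- ===== PORT B =====
def render_vni_gateway_markdown_lines_alt (records : List (List (String × String))) (title : String) (include_vlan_name : Bool) : List String :=
  let cols := ["l3vni", "vrf", "l2vni", "gateway_ipv4", "gateway_ipv6", "device", "vlan"]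
  let cols := if include_vlan_name then cols ++ ["vlan_name"] else cols
  -- stage 1: cell grid (header row first, then one row of looked-up cell strings per record)
  let grid := [cols] ++ records.map (fun r => cols.map (fun c => pvRGet r c))
  -- stage 2: render every grid row with one uniform rule
  let rendered := grid.map (fun row => "| " ++ PySem.Str.join " | " row ++ " |")
  let sep := "|" ++ PySem.Str.join "|" (List.replicate cols.length "---") ++ "|"
  -- stage 3: assemble
  ["# " ++ title, ""] ++ rendered.take 1 ++ [sep] ++ rendered.drop 1

-- ===== PRECONDITION & SPEC =====
def Spec_render_vni_gateway_markdown_lines (records : List (List (String × String))) (title : String) (include_vlan_name : Bool) (out : List String) : Prop := out = render_vni_gateway_markdown_lines_alt records title include_vlan_name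
instance (records : List (List (String × String))) (title : String) (include_vlan_name : Bool) (out : List String) : Decidable (Spec_render_vni_gateway_markdown_lines records title include_vlan_name out) := by unfold Spec_render_vni_gateway_markdown_lines; infer_instance

-- ===== CLAIM (what is proved, stated in full; the proofs are below) =====
def Claim_equal_render_vni_gateway_markdown_lines : Prop := ∀ (records : List (List (String × String))) (title : String) (include_vlan_name : Bool), Dom_render_vni_gateway_markdown_lines records title include_vlan_name → Spec_render_vni_gateway_markdown_lines records title include_vlan_name (render_vni_gateway_markdown_lines records title include_vlan_name)

-- ===== LEMMAS AND PROOFS =====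

theorem row_eq_true (r : List (String × String)) :
    "| " ++ pvRGet r "l3vni" ++ " | " ++ pvRGet r "vrf" ++ " | " ++ pvRGet r "l2vni" ++ " | "
      ++ pvRGet r "gateway_ipv4" ++ " | " ++ pvRGet r "gateway_ipv6" ++ " | " ++ pvRGet r "device"
      ++ " | " ++ pvRGet r "vlan" ++ " | " ++ pvRGet r "vlan_name" ++ " |"
    = "| " ++ PySem.Str.join " | "
        ((["l3vni", "vrf", "l2vni", "gateway_ipv4", "gateway_ipv6", "device", "vlan"] ++ ["vlan_name"]).map
          (fun c => pvRGet r c)) ++ " |" := by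
  simp [PySem.Str.join, PySem.Chars.join, String.ext_iff, List.intercalate, List.intersperse]

theorem row_eq_false (r : List (String × String)) :
    "| " ++ pvRGet r "l3vni" ++ " | " ++ pvRGet r "vrf" ++ " | " ++ pvRGet r "l2vni" ++ " | "
      ++ pvRGet r "gateway_ipv4" ++ " | " ++ pvRGet r "gateway_ipv6" ++ " | " ++ pvRGet r "device"
      ++ " | " ++ pvRGet r "vlan" ++ " |"
    = "| " ++ PySem.Str.join " | "
        ((["l3vni", "vrf", "l2vni", "gateway_ipv4", "gateway_ipv6", "device", "vlan"]).map
          (fun c => pvRGet r c)) ++ " |" := by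
  simp [PySem.Str.join, PySem.Chars.join, String.ext_iff, List.intercalate, List.intersperse]

theorem hdr_false :
    "| l3vni | vrf | l2vni | gateway_ipv4 | gateway_ipv6 | device | vlan |"
    = "| " ++ PySem.Str.join " | " ["l3vni", "vrf", "l2vni", "gateway_ipv4", "gateway_ipv6", "device", "vlan"] ++ " |" := by
  decide

theorem hdr_true :
    "| l3vni | vrf | l2vni | gateway_ipv4 | gateway_ipv6 | device | vlan | vlan_name |"
    = "| " ++ PySem.Str.join " | " (["l3vni", "vrf", "l2vni", "gateway_ipv4", "gateway_ipv6", "device", "vlan"] ++ ["vlan_name"]) ++ " |" := by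
  decide

theorem sep_false :
    "|---|---|---|---|---|---|---|"
    = "|" ++ PySem.Str.join "|" (List.replicate (["l3vni", "vrf", "l2vni", "gateway_ipv4", "gateway_ipv6", "device", "vlan"] : List String).length "---") ++ "|" := by
  decide

theorem sep_true :
    "|---|---|---|---|---|---|---|---|"
    = "|" ++ PySem.Str.join "|" (List.replicate ((["l3vni", "vrf", "l2vni", "gateway_ipv4", "gateway_ipv6", "device", "vlan"] : List String) ++ ["vlan_name"]).length "---") ++ "|" := by
  decide

theorem foldl_app {A : Type} (f : A -> String) (init : List String) (rs : List A) :
    rs.foldl (fun ls r => ls ++ [f r]) init = init ++ rs.map f := by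
  induction rs generalizing init with
  | nil => simp
  | cons x xs ih => simp [ih]

-- ===== VERDICT (by name: the statement is the Claim_ definition above) =====
theorem render_vni_gateway_markdown_lines_spec : Claim_equal_render_vni_gateway_markdown_lines := by
  intro records title iv _
  unfold Spec_render_vni_gateway_markdown_lines
  unfold render_vni_gateway_markdown_lines render_vni_gateway_markdown_lines_alt
  cases iv
  · simp only [Bool.false_eq_true, if_false]
    rw [foldl_app]
    rw [List.map_congr_left (fun r _ => row_eq_false r), hdr_false, sep_false]
    simp
  · simp only [if_true]
    rw [foldl_app]
    rw [List.map_congr_left (fun r _ => row_eq_true r), hdr_true, sep_true]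
    simp
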